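-- pv_equiv track=rewrite | github.com/Andalexshap/Python | Seminar/Home_work/Home_work_3/Example_5.py | fibonachi
-- ===== SOURCE A (Python) =====
-- def fibonachi(n):
--     new_list = [1,0,1]
--     if n == 1:
--         return new_list
--     for i in range(1, n):
--         new_list.insert(0, new_list[1] - new_list[0])
--         new_list.append(new_list[-1] + new_list[-2])
--     return new_list
-- ===== SOURCE B (Python) =====
-- def fibonachi(n):
--     if n <= 1:
--         return [1, 0, 1]
--     fib = [0, 1]
--     for _ in range(n - 1):
--         fib.append(fib[-1] + fib[-2])
--     left = [(-1) ** (k + 1) * fib[k] for k in range(n, 0, -1)]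
--     return left + fib
-- ===== Notes on version B (the rewrite author's own statement) =====
-- stated objective: alternative
-- what changed: B builds the forward Fibonacci list in one pass and derives the left half by the negafibonacci sign identity F_{-k} = (-1)^(k+1) F_k, instead of A's simultaneous two-ended growth with insert(0,...) (which is O(n) per prepend).
import Mathlib
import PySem

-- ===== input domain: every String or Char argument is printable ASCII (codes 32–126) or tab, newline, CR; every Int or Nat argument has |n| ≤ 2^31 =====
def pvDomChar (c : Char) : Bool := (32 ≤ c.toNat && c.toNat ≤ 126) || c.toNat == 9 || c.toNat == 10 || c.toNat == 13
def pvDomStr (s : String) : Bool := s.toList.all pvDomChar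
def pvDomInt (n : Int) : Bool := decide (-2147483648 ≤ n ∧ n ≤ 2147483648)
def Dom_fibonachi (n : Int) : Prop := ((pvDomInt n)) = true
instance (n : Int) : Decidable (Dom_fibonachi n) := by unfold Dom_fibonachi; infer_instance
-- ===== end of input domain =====

-- B replaces A's two-ended growth (insert at front + append) by one forward Fibonacci pass
-- plus a sign-mirrored left half via the negafibonacci identity; return values proved equal.


-- ===== PORT A =====
-- one loop body: new_list.insert(0, new_list[1] - new_list[0]); new_list.append(new_list[-1] + new_list[-2])
-- (the Python indexing can never raise here: the list always has ≥ 3 elements, so pyGetD is exact)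
def fibonachiStepA (l : List Int) : List Int :=
  let l' := (PySem.List.pyGetD l 1 0 - PySem.List.pyGetD l 0 0) :: l
  l' ++ [PySem.List.pyGetD l' (-1) 0 + PySem.List.pyGetD l' (-2) 0]

def fibonachi (n : Int) : List Int :=
  let new_list : List Int := [1, 0, 1]
  if n == 1 then new_list
  else (PySem.List.pyRange 1 n 1).foldl (fun l _ => fibonachiStepA l) new_list

-- ===== PORT B =====
-- fib.append(fib[-1] + fib[-2])  (list always has ≥ 2 elements, so pyGetD is exact)
def fibonachiStepB (f : List Int) : List Int :=
  f ++ [PySem.List.pyGetD f (-1) 0 + PySem.List.pyGetD f (-2) 0]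

def fibonachi_alt (n : Int) : List Int :=
  if n ≤ 1 then [1, 0, 1]
  else
    let fib := (PySem.List.pyRange 0 (n - 1) 1).foldl (fun f _ => fibonachiStepB f) [0, 1]
    -- (-1) ** (k + 1): k ranges over n..1, so the exponent is ≥ 2 and toNat is exact
    let left := (PySem.List.pyRange n 0 (-1)).map
      (fun k => (-1 : Int) ^ (k + 1).toNat * PySem.List.pyGetD fib k 0)
    left ++ fib

-- ===== PRECONDITION & SPEC =====
def Spec_fibonachi (n : Int) (out : List Int) : Prop := out = fibonachi_alt n
instance (n : Int) (out : List Int) : Decidable (Spec_fibonachi n out) := by unfold Spec_fibonachi; infer_instance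

-- ===== CLAIM (what is proved, stated in full; the proofs are below) =====
def Claim_equal_fibonachi : Prop := ∀ (n : Int), Dom_fibonachi n → Spec_fibonachi n (fibonachi n)

-- ===== LEMMAS AND PROOFS =====

-- reference Fibonacci
def fibN : Nat → Int
  | 0 => 0
  | 1 => 1
  | (k + 2) => fibN k + fibN (k + 1)

-- negafibonacci value F_{-k}
def nf (k : Nat) : Int := (-1 : Int) ^ (k + 1) * fibN k

-- [F_0, …, F_{m-1}]
def posList (m : Nat) : List Int := (List.range m).map fibN

-- [F_{-m}, …, F_{-1}]
def negList : Nat → List Int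
  | 0 => []
  | (m + 1) => nf (m + 1) :: negList m

lemma nf_rec (k : Nat) : nf (k + 2) = nf k - nf (k + 1) := by
  simp [nf, fibN, pow_succ]; ring

lemma posList_succ (m : Nat) : posList (m + 1) = posList m ++ [fibN m] := by
  simp [posList, List.range_succ]

lemma penult_append (xs : List Int) (a b : Int) :
    PySem.List.pyGetD (xs ++ [a, b]) (-2) 0 = a := by
  have h : xs ++ [a, b] = (xs ++ [a]) ++ [b] := by simp
  rw [h, PySem.List.pyGetD_neg_ofNat _ 2 0 (by omega) (by simp)]
  simp

lemma last_append (xs : List Int) (a b : Int) :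
    PySem.List.pyGetD (xs ++ [a, b]) (-1) 0 = b := by
  have h : xs ++ [a, b] = (xs ++ [a]) ++ [b] := by simp
  rw [h, PySem.List.pyGetD_neg_one_append_singleton]

lemma stepB_pos (m : Nat) : fibonachiStepB (posList (m + 2)) = posList (m + 3) := by
  have h2 : posList (m + 2) = posList m ++ [fibN m, fibN (m + 1)] := by
    rw [posList_succ, posList_succ]; simp
  rw [fibonachiStepB, h2, last_append, penult_append]
  have : fibN m + (fibN m + fibN (m + 1)) = fibN m + fibN (m + 2) := by
    simp [fibN]
  rw [posList_succ (m + 2), posList_succ, posList_succ]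
  simp [fibN]; ring

lemma negList_get1 (m : Nat) :
    (negList m ++ posList (m + 2)).getD 0 0 = nf m := by
  cases m with
  | zero => decide
  | succ k => simp [negList]

lemma stepA_state (m : Nat) :
    fibonachiStepA (negList (m + 1) ++ posList (m + 2)) = negList (m + 2) ++ posList (m + 3) := by
  rw [fibonachiStepA]
  have hcons : negList (m + 1) ++ posList (m + 2) = nf (m + 1) :: (negList m ++ posList (m + 2)) := by
    simp [negList]
  have h0 : PySem.List.pyGetD (negList (m + 1) ++ posList (m + 2)) 0 0 = nf (m + 1) := by
    rw [hcons, PySem.List.pyGetD_zero_cons]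
  have h1 : PySem.List.pyGetD (negList (m + 1) ++ posList (m + 2)) 1 0 = nf m := by
    rw [hcons, show (1 : Int) = ((1 : Nat) : Int) by norm_num, PySem.List.pyGetD_natCast]
    simpa using negList_get1 m
  rw [h0, h1, ← nf_rec]
  have hhead : nf (m + 2) :: (negList (m + 1) ++ posList (m + 2))
      = negList (m + 2) ++ posList (m + 2) := by simp [negList]
  rw [hhead]
  have h2 : posList (m + 2) = posList m ++ [fibN m, fibN (m + 1)] := by
    rw [posList_succ, posList_succ]; simp
  have hla : negList (m + 2) ++ posList (m + 2)
      = (negList (m + 2) ++ posList m) ++ [fibN m, fibN (m + 1)] := by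
    rw [h2]; simp
  rw [hla, last_append, penult_append]
  rw [posList_succ (m + 2), h2]
  simp [fibN]; ring

-- A's loop: after folding range(1, 1+m) the state is negList (m+1) ++ posList (m+2)
lemma A_loop (m : Nat) :
    (PySem.List.pyRange 1 (1 + (m : Int)) 1).foldl (fun l _ => fibonachiStepA l) [1, 0, 1]
      = negList (m + 1) ++ posList (m + 2) := by
  induction m with
  | zero =>
      simp [PySem.List.pyRange_one_eq_nil, negList, posList, nf, fibN, List.range_succ]
  | succ k ih =>
      have hsp : (1 + ((k : Int) + 1)) = (1 + (k : Int)) + 1 := by ring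
      have : PySem.List.pyRange 1 (1 + ((k + 1 : Nat) : Int)) 1
          = PySem.List.pyRange 1 (1 + (k : Int)) 1 ++ [1 + (k : Int)] := by
        push_cast
        rw [hsp, PySem.List.pyRange_one_succ_right (by omega)]
      rw [this, List.foldl_append, ih]
      simp only [List.foldl]
      exact stepA_state k

-- B's fib loop: after folding range(0, m) the state is posList (m+2)
lemma B_loop (m : Nat) :
    (PySem.List.pyRange 0 (m : Int) 1).foldl (fun f _ => fibonachiStepB f) [0, 1]
      = posList (m + 2) := by
  induction m with
  | zero =>
      simp [PySem.List.pyRange_one_eq_nil, posList, List.range_succ, fibN]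
  | succ k ih =>
      have : PySem.List.pyRange 0 ((k + 1 : Nat) : Int) 1
          = PySem.List.pyRange 0 (k : Int) 1 ++ [(k : Int)] := by
        push_cast
        rw [PySem.List.pyRange_one_succ_right (by omega)]
      rw [this, List.foldl_append, ih]
      simp only [List.foldl]
      exact stepB_pos k

lemma posList_get (m k : Nat) (hk : k < m) :
    PySem.List.pyGetD (posList m) (k : Int) 0 = fibN k := by
  simp [posList, PySem.List.pyGetD_natCast, List.getD, hk]

-- B's left comprehension over range(m, 0, -1) produces negList m
lemma B_left (m t : Nat) (hm : m ≤ t) :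
    (PySem.List.pyRange (m : Int) 0 (-1)).map
      (fun k => (-1 : Int) ^ (k + 1).toNat * PySem.List.pyGetD (posList (t + 1)) k 0)
      = negList m := by
  induction m with
  | zero => simp [PySem.List.pyRange_neg_one_eq_nil, negList]
  | succ k ih =>
      rw [PySem.List.pyRange_neg_one_cons (by push_cast; omega)]
      have hc : ((k + 1 : Nat) : Int) - 1 = (k : Int) := by push_cast; ring
      rw [List.map_cons, hc, ih (by omega)]
      have hg : PySem.List.pyGetD (posList (t + 1)) ((k + 1 : Nat) : Int) 0 = fibN (k + 1) :=
        posList_get (t + 1) (k + 1) (by omega)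
      have he : (((k + 1 : Nat) : Int) + 1).toNat = k + 2 := by push_cast; omega
      rw [hg, he]
      simp [negList, nf]

theorem fibonachi_eq (n : Int) : fibonachi n = fibonachi_alt n := by
  by_cases h1 : n ≤ 1
  · rcases eq_or_lt_of_le h1 with h | h
    · simp [fibonachi, fibonachi_alt, h]
    · have hne : ¬ (n == 1) = true := by simp; omega
      simp only [fibonachi, fibonachi_alt, if_pos h1, hne, if_false, Bool.false_eq_true]
      rw [PySem.List.pyRange_one_eq_nil (by omega)]
      rfl
  · rw [not_le] at h1
    obtain ⟨m, hm⟩ : ∃ m : Nat, n = 1 + (m : Int) + 1 := ⟨(n - 2).toNat, by omega⟩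
    have hne : ¬ (n == 1) = true := by simp; omega
    have hnle : ¬ n ≤ 1 := by omega
    simp only [fibonachi, fibonachi_alt, hne, if_false, if_neg hnle, Bool.false_eq_true]
    have hA : PySem.List.pyRange 1 n 1
        = PySem.List.pyRange 1 (1 + ((m + 1 : Nat) : Int)) 1 := by
      rw [hm]; push_cast; ring_nf
    rw [hA, A_loop (m + 1)]
    have hB : PySem.List.pyRange 0 (n - 1) 1
        = PySem.List.pyRange 0 ((m + 1 : Nat) : Int) 1 := by
      rw [hm]; push_cast; ring_nf
    rw [hB, B_loop (m + 1)]
    have hL : PySem.List.pyRange n 0 (-1)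
        = PySem.List.pyRange ((m + 2 : Nat) : Int) 0 (-1) := by
      rw [hm]; push_cast; ring_nf
    rw [hL, B_left (m + 2) (m + 2) (le_refl _)]

-- ===== VERDICT (by name: the statement is the Claim_ definition above) =====
theorem fibonachi_spec : Claim_equal_fibonachi := by
  intro n _
  exact fibonachi_eq n
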